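-- pv_equiv track=rewrite | github.com/Cerebras/modelzoo | modelzoo/transformers/pytorch/t5/input/utils.py | concatenate_documents
-- ===== SOURCE A (Python) =====
-- def concatenate_documents(dataset, num_to_concatenate=128, pad_id=0):
--     """
--     Concatenate unrelated documents together to reduce the need for padding.
--
--     :param iterable dataset: The input dataset.
--     :param int num_to_concatenate: How many documents to concatanate together.
--     :params int pad_id: The vocab id reserved for padding values. Must not occur
--         anywhere in the dataset.
--     :yields: new samples made from concatenating samples in `dataset`.
--     """
--     new_sample = []
--     count = 0
--     for x in dataset:
--         new_sample.extend(x)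
--         count += 1
--         if count == num_to_concatenate:
--             yield new_sample
--             new_sample = []
--             count = 0
-- ===== SOURCE B (Python) =====
-- def concatenate_documents(dataset, num_to_concatenate=128, pad_id=0):
--     """Group-then-flatten: slice full groups of num_to_concatenate documents
--     off the front of the data and yield each group flattened; a trailing
--     partial group is dropped."""
--     if num_to_concatenate <= 0:
--         return
--     rest = list(dataset)
--     while len(rest) >= num_to_concatenate:
--         chunk, rest = rest[:num_to_concatenate], rest[num_to_concatenate:]
--         yield [tok for doc in chunk for tok in doc]
-- ===== Notes on version B (the rewrite author's own statement) =====
-- stated objective: alternative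
-- what changed: Replaces A's counted single-pass accumulator (extend + counter + reset) with a group-then-flatten decomposition: slice full groups off the front of the list and yield each group flattened.
import Mathlib
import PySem

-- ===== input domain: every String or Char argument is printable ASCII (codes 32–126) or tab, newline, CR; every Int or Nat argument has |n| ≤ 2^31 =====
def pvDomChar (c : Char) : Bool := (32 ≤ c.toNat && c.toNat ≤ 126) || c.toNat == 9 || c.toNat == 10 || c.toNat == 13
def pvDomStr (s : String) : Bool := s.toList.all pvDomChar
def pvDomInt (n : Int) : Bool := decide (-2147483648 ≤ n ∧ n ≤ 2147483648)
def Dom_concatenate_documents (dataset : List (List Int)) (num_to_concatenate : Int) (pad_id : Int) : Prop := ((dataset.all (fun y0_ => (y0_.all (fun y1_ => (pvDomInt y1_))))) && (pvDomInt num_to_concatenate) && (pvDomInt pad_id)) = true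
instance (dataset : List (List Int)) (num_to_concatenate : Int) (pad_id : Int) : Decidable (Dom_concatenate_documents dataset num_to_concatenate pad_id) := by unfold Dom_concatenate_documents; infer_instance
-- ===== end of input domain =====

-- B replaces A's counted accumulator pass by slicing full groups off the front and flattening each (alternative decomposition, same cost).
-- Note: A and B are Python generators; the equivalence proved is about the list of yielded values.


-- ===== PORT A =====
-- state = (new_sample, count, yielded-so-far); one fold step per document, exactly A's loop body
def concatenate_documents_step (n : Int) (st : List Int × Int × List (List Int)) (x : List Int) :
    List Int × Int × List (List Int) :=
  let new_sample := st.1 ++ x        -- new_sample.extend(x)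
  let count := st.2.1 + 1            -- count += 1
  if count = n then ([], 0, st.2.2 ++ [new_sample]) else (new_sample, count, st.2.2)

def concatenate_documents (dataset : List (List Int)) (num_to_concatenate : Int) (pad_id : Int) : List (List Int) :=
  (dataset.foldl (concatenate_documents_step num_to_concatenate) ([], 0, [])).2.2

-- ===== PORT B =====
-- Source B's while loop: slice a full group off the front (rest[:k] / rest[k:] = take/drop for k ≥ 0, exact),
-- flatten it, recurse on the rest; the `k ≠ 0` conjunct is a termination guard (Source B returns before the loop when k ≤ 0).
def concatenate_documents_chunks (k : Nat) (rest : List (List Int)) : List (List Int) :=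
  if h : k ≤ rest.length ∧ k ≠ 0 then
    (rest.take k).flatten :: concatenate_documents_chunks k (rest.drop k)
  else []
termination_by rest.length
decreasing_by simp only [List.length_drop]; omega

def concatenate_documents_alt (dataset : List (List Int)) (num_to_concatenate : Int) (pad_id : Int) : List (List Int) :=
  if num_to_concatenate ≤ 0 then []
  else concatenate_documents_chunks num_to_concatenate.toNat dataset

-- ===== PRECONDITION & SPEC =====
def Spec_concatenate_documents (dataset : List (List Int)) (num_to_concatenate : Int) (pad_id : Int) (out : List (List Int)) : Prop := out = concatenate_documents_alt dataset num_to_concatenate pad_id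
instance (dataset : List (List Int)) (num_to_concatenate : Int) (pad_id : Int) (out : List (List Int)) : Decidable (Spec_concatenate_documents dataset num_to_concatenate pad_id out) := by unfold Spec_concatenate_documents; infer_instance

-- ===== CLAIM (what is proved, stated in full; the proofs are below) =====
def Claim_equal_concatenate_documents : Prop := ∀ (dataset : List (List Int)) (num_to_concatenate : Int) (pad_id : Int), Dom_concatenate_documents dataset num_to_concatenate pad_id → Spec_concatenate_documents dataset num_to_concatenate pad_id (concatenate_documents dataset num_to_concatenate pad_id)

-- ===== LEMMAS AND PROOFS =====

-- With a non-positive group size A's counter (≥ 1 after any step) never equals n, so nothing is ever yielded.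
theorem foldA_nonpos (n : Int) (hn : n ≤ 0) :
    ∀ (ds : List (List Int)) (acc : List Int) (c : Int) (out : List (List Int)), 0 ≤ c →
      (ds.foldl (concatenate_documents_step n) (acc, c, out)).2.2 = out := by
  intro ds
  induction ds with
  | nil => intro acc c out _; simp [List.foldl]
  | cons x ds ih =>
    intro acc c out hc
    have hne : ¬ (c + 1 = n) := by omega
    simp only [List.foldl, concatenate_documents_step, hne, if_neg hne]
    exact ih (acc ++ x) (c + 1) out (by omega)

-- Loop invariant for 0 < n: the pending state is the flatten/length of a partial group p with p.length < n,
-- and the fold's output is the already-yielded list followed by the chunks of p ++ ds.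
theorem foldA_chunks (n : Int) (hn : 0 < n) :
    ∀ (ds p : List (List Int)) (out : List (List Int)), (p.length : Int) < n →
      (ds.foldl (concatenate_documents_step n) (p.flatten, (p.length : Int), out)).2.2
        = out ++ concatenate_documents_chunks n.toNat (p ++ ds) := by
  intro ds
  induction ds with
  | nil =>
    intro p out hp
    have hguard : ¬ (n.toNat ≤ (p ++ ([] : List (List Int))).length ∧ n.toNat ≠ 0) := by
      simp only [List.append_nil]
      omega
    rw [concatenate_documents_chunks, dif_neg hguard]
    simp [List.foldl]
  | cons x ds ih =>
    intro p out hp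
    by_cases h : (p.length : Int) + 1 = n
    · -- the group is completed by x: yield it and start afresh
      have hstep : concatenate_documents_step n (p.flatten, (p.length : Int), out) x
          = ([], 0, out ++ [p.flatten ++ x]) := by
        simp [concatenate_documents_step, h]
      have h0 : ((([] : List (List Int)).length : Int)) < n := by simpa using hn
      have ih0 := ih [] (out ++ [p.flatten ++ x]) h0
      simp only [List.flatten_nil, List.length_nil, Int.natCast_zero, List.nil_append] at ih0
      simp only [List.foldl, hstep]
      have hlen : (p ++ [x]).length = n.toNat := by
        simp only [List.length_append, List.length_cons, List.length_nil]
        omega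
      have hguard : n.toNat ≤ (p ++ x :: ds).length ∧ n.toNat ≠ 0 := by
        constructor
        · simp only [List.length_append, List.length_cons]; omega
        · omega
      have hsplit : p ++ x :: ds = (p ++ [x]) ++ ds := by simp
      have htake : ((p ++ x :: ds).take n.toNat) = p ++ [x] := by
        rw [hsplit, ← hlen, List.take_left]
      have hdrop : ((p ++ x :: ds).drop n.toNat) = ds := by
        rw [hsplit, ← hlen, List.drop_left]
      rw [concatenate_documents_chunks, dif_pos hguard, htake, hdrop]
      rw [ih0]
      simp
    · -- group still incomplete: x joins the pending partial group
      have hstep : concatenate_documents_step n (p.flatten, (p.length : Int), out) x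
          = ((p ++ [x]).flatten, (((p ++ [x]).length : Int)), out) := by
        simp [concatenate_documents_step, h]
      have hlt : (((p ++ [x]).length : Int)) < n := by
        simp only [List.length_append, List.length_cons, List.length_nil]
        push_cast
        omega
      simp only [List.foldl, hstep]
      rw [ih (p ++ [x]) out hlt]
      simp

-- ===== VERDICT (by name: the statement is the Claim_ definition above) =====
theorem concatenate_documents_spec : Claim_equal_concatenate_documents := by
  intro dataset n pad _
  unfold Spec_concatenate_documents concatenate_documents concatenate_documents_alt
  by_cases hn : n ≤ 0
  · rw [if_pos hn]
    exact foldA_nonpos n hn dataset [] 0 [] le_rfl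
  · rw [if_neg hn]
    have hn' : 0 < n := by omega
    have := foldA_chunks n hn' dataset [] [] (by simpa using hn')
    simpa using this
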